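-- pv_equiv track=rewrite | github.com/zensgit/cad-ml-platform | src/core/feature_extractor.py | slots
-- ===== SOURCE A (Python) =====
-- from typing import Any, Dict, List
--
-- SLOTS_V1 = [
--     ("entity_count", "geometric"),
--     ("bbox_width", "geometric"),
--     ("bbox_height", "geometric"),
--     ("bbox_depth", "geometric"),
--     ("bbox_volume_estimate", "geometric"),
--     ("layer_count", "semantic"),
--     ("complexity_high_flag", "semantic"),
-- ]
--
-- SLOTS_V2 = [
--     ("norm_width", "geometric"),
--     ("norm_height", "geometric"),
--     ("norm_depth", "geometric"),
--     ("width_height_ratio", "geometric"),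
--     ("width_depth_ratio", "geometric"),
-- ]
--
-- SLOTS_V3 = [
--     ("solids_count", "geometric"),
--     ("facets_count", "geometric"),
--     ("avg_volume_per_entity", "geometric"),
--     ("solids_ratio", "geometric"),
--     ("facets_ratio", "geometric"),
--     ("top_kind_freq_1", "geometric"),
--     ("top_kind_freq_2", "geometric"),
--     ("top_kind_freq_3", "geometric"),
--     ("top_kind_freq_4", "geometric"),
--     ("top_kind_freq_5", "geometric"),
-- ]
--
-- SLOTS_V4 = [
--     ("surface_count", "geometric"),
--     ("shape_entropy", "geometric"),
-- ]
--
-- def slots(version: str) -> List[Dict[str, str]]: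
--     base: List[Dict[str, str]] = [
--         {"name": n, "category": c, "version": "v1"} for n, c in SLOTS_V1
--     ]
--     if version in {"v2", "v3", "v4"}:
--         base.extend({"name": n, "category": c, "version": "v2"} for n, c in SLOTS_V2)
--     if version in {"v3", "v4"}:
--         base.extend({"name": n, "category": c, "version": "v3"} for n, c in SLOTS_V3)
--     if version == "v4":
--         base.extend({"name": n, "category": c, "version": "v4"} for n, c in SLOTS_V4)
--     return base
-- ===== SOURCE B (Python) =====
-- SLOTS_V1 = [
--     ("entity_count", "geometric"),
--     ("bbox_width", "geometric"),
--     ("bbox_height", "geometric"),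
--     ("bbox_depth", "geometric"),
--     ("bbox_volume_estimate", "geometric"),
--     ("layer_count", "semantic"),
--     ("complexity_high_flag", "semantic"),
-- ]
-- SLOTS_V2 = [
--     ("norm_width", "geometric"),
--     ("norm_height", "geometric"),
--     ("norm_depth", "geometric"),
--     ("width_height_ratio", "geometric"),
--     ("width_depth_ratio", "geometric"),
-- ]
-- SLOTS_V3 = [
--     ("solids_count", "geometric"),
--     ("facets_count", "geometric"),
--     ("avg_volume_per_entity", "geometric"),
--     ("solids_ratio", "geometric"),
--     ("facets_ratio", "geometric"),
--     ("top_kind_freq_1", "geometric"),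
--     ("top_kind_freq_2", "geometric"),
--     ("top_kind_freq_3", "geometric"),
--     ("top_kind_freq_4", "geometric"),
--     ("top_kind_freq_5", "geometric"),
-- ]
-- SLOTS_V4 = [
--     ("surface_count", "geometric"),
--     ("shape_entropy", "geometric"),
-- ]
--
-- # one unified tier table: (name, category, version label, tier 1..4)
-- _TIER_TABLE = [
--     (n, c, ver, tier)
--     for tier, (ver, group) in enumerate(
--         [("v1", SLOTS_V1), ("v2", SLOTS_V2), ("v3", SLOTS_V3), ("v4", SLOTS_V4)], start=1
--     )
--     for n, c in group
-- ]
-- _RANK = {"v1": 1, "v2": 2, "v3": 3, "v4": 4}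
--
-- def slots(version: str):
--     rank = _RANK.get(version, 1)
--     return [
--         {"name": n, "category": c, "version": ver}
--         for n, c, ver, tier in _TIER_TABLE
--         if tier <= rank
--     ]
-- ===== Notes on version B (the rewrite author's own statement) =====
-- stated objective: simpler
-- what changed: Replaces A's four staged if/extend branches with one unified (name, category, version, tier) table filtered by a numeric rank computed from the version (default 1), built in a single pass.
import Mathlib
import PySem

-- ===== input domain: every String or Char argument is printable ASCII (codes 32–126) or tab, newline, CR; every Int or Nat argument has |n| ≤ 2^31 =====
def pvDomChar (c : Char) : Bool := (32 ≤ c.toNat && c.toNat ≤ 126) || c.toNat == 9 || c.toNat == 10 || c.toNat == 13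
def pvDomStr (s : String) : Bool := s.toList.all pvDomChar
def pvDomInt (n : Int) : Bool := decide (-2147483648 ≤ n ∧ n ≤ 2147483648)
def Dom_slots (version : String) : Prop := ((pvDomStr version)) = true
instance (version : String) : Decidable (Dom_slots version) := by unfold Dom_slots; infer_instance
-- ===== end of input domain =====

-- B replaces A's four staged if/extend branches by one rank-filtered pass over a single
-- unified tier table (objective: simpler decomposition; same cost).

-- ===== PORT A =====
def SLOTS_V1 : List (String × String) :=
  [("entity_count", "geometric"), ("bbox_width", "geometric"), ("bbox_height", "geometric"),
   ("bbox_depth", "geometric"), ("bbox_volume_estimate", "geometric"),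
   ("layer_count", "semantic"), ("complexity_high_flag", "semantic")]

def SLOTS_V2 : List (String × String) :=
  [("norm_width", "geometric"), ("norm_height", "geometric"), ("norm_depth", "geometric"),
   ("width_height_ratio", "geometric"), ("width_depth_ratio", "geometric")]

def SLOTS_V3 : List (String × String) :=
  [("solids_count", "geometric"), ("facets_count", "geometric"),
   ("avg_volume_per_entity", "geometric"), ("solids_ratio", "geometric"),
   ("facets_ratio", "geometric"), ("top_kind_freq_1", "geometric"),
   ("top_kind_freq_2", "geometric"), ("top_kind_freq_3", "geometric"),
   ("top_kind_freq_4", "geometric"), ("top_kind_freq_5", "geometric")]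

def SLOTS_V4 : List (String × String) :=
  [("surface_count", "geometric"), ("shape_entropy", "geometric")]

-- {"name": n, "category": c, "version": ver} as an association list in insertion order
def mkSlot (ver : String) (p : String × String) : List (String × String) :=
  [("name", p.1), ("category", p.2), ("version", ver)]

def slots (version : String) : List (List (String × String)) :=
  let base := SLOTS_V1.map (mkSlot "v1")
  let base := if version ∈ (PySem.Set.ofList ["v2", "v3", "v4"]) then
                base ++ SLOTS_V2.map (mkSlot "v2") else base
  let base := if version ∈ (PySem.Set.ofList ["v3", "v4"]) then
                base ++ SLOTS_V3.map (mkSlot "v3") else base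
  let base := if version == "v4" then base ++ SLOTS_V4.map (mkSlot "v4") else base
  base

-- ===== PORT B =====
-- unified tier table: (name, category, version label, tier 1..4)
def tierTable : List (String × String × String × Int) :=
  ((PySem.List.enumerate [("v1", SLOTS_V1), ("v2", SLOTS_V2), ("v3", SLOTS_V3), ("v4", SLOTS_V4)] 1).map
    (fun p => p.2.2.map (fun nc => (nc.1, nc.2, p.2.1, p.1)))).flatten

def rankDict : PySem.Dict String Int :=
  PySem.Dict.ofList [("v1", 1), ("v2", 2), ("v3", 3), ("v4", 4)]

def slots_alt (version : String) : List (List (String × String)) :=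
  let rank := PySem.Dict.getD rankDict version 1
  (tierTable.filter (fun e => e.2.2.2 ≤ rank)).map
    (fun e => [("name", e.1), ("category", e.2.1), ("version", e.2.2.1)])

-- ===== PRECONDITION & SPEC =====
def Spec_slots (version : String) (out : List (List (String × String))) : Prop := out = slots_alt version
instance (version : String) (out : List (List (String × String))) : Decidable (Spec_slots version out) := by unfold Spec_slots; infer_instance

-- ===== CLAIM (what is proved, stated in full; the proofs are below) =====
def Claim_equal_slots : Prop := ∀ (version : String), Dom_slots version → Spec_slots version (slots version)

-- ===== LEMMAS AND PROOFS =====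
theorem slots_eq_default (version : String)
    (h1 : version ≠ "v1") (h2 : version ≠ "v2") (h3 : version ≠ "v3") (h4 : version ≠ "v4") :
    slots version = slots_alt version := by
  have e1 : ("v1" == version) = false := by rw [beq_eq_false_iff_ne]; exact fun h => h1 h.symm
  have e2 : ("v2" == version) = false := by rw [beq_eq_false_iff_ne]; exact fun h => h2 h.symm
  have e3 : ("v3" == version) = false := by rw [beq_eq_false_iff_ne]; exact fun h => h3 h.symm
  have e4 : ("v4" == version) = false := by rw [beq_eq_false_iff_ne]; exact fun h => h4 h.symm
  simp [slots, slots_alt, PySem.Set.ofList, PySem.Set.add, PySem.Dict.getD, PySem.Dict.get?,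
        PySem.Dict.ofList, PySem.Dict.update, PySem.Dict.insert, PySem.Dict.empty,
        List.find?, PySem.List.enumerate, rankDict, tierTable, SLOTS_V1, SLOTS_V2,
        SLOTS_V3, SLOTS_V4, mkSlot, h2, h3, h4, e1, e2, e3, e4]

-- ===== VERDICT (by name: the statement is the Claim_ definition above) =====
theorem slots_spec : Claim_equal_slots := by
  intro version _
  unfold Spec_slots
  by_cases h1 : version = "v1"
  · subst h1; decide
  by_cases h2 : version = "v2"
  · subst h2; decide
  by_cases h3 : version = "v3"
  · subst h3; decide
  by_cases h4 : version = "v4"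
  · subst h4; decide
  exact slots_eq_default version h1 h2 h3 h4
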